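-- pv_equiv track=rewrite | github.com/LuizFrL/ProjetoIntegrador3_Faculdade | Projeto_2/Loteria.py | gerar_grupo_vencedores
-- ===== SOURCE A (Python) =====
-- def gerar_grupo_vencedores(partipantes):
--     vencedores = {
--         '12 Acertos': [],
--         '11 Acertos': [],
--         '10 Acertos': []
--     }
--     for pessoa, qtd_acerto in partipantes.items():
--         if qtd_acerto == 12:
--             vencedores['12 Acertos'].append(pessoa)
--         elif qtd_acerto == 11:
--             vencedores['11 Acertos'].append(pessoa)
--         elif qtd_acerto == 10:
--             vencedores['10 Acertos'].append(pessoa)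
--
--     return vencedores
-- ===== SOURCE B (Python) =====
-- def gerar_grupo_vencedores(partipantes):
--     return {
--         '12 Acertos': [p for p, q in partipantes.items() if q == 12],
--         '11 Acertos': [p for p, q in partipantes.items() if q == 11],
--         '10 Acertos': [p for p, q in partipantes.items() if q == 10],
--     }
-- ===== Notes on version B (the rewrite author's own statement) =====
-- stated objective: simpler
-- what changed: Replaces the single dispatching loop that appends into a pre-built dict with a literal dict of three independent filtered comprehensions, one pass per key.
import Mathlib
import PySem

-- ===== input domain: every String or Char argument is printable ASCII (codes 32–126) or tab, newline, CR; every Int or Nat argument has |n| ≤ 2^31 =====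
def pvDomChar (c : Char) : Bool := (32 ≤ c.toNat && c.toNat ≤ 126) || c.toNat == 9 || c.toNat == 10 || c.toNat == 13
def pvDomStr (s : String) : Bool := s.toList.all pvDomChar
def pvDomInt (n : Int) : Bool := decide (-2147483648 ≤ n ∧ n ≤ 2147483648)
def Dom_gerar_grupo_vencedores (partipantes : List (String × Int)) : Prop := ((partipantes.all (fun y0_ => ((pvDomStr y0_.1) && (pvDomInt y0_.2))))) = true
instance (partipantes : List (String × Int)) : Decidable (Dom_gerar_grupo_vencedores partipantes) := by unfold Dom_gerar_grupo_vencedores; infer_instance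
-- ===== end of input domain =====

-- B replaces A's single dispatching loop (appending into a pre-built 3-key dict) with a literal dict of three independent filtered comprehensions; objective: simpler.


-- ===== PORT A =====
-- Port of A: the dict of three empty lists is the triple state; the loop appends by dispatch.
def gerarStep (v : List String × List String × List String) (pq : String × Int) :
    List String × List String × List String :=
  if pq.2 == 12 then (v.1 ++ [pq.1], v.2.1, v.2.2)
  else if pq.2 == 11 then (v.1, v.2.1 ++ [pq.1], v.2.2)
  else if pq.2 == 10 then (v.1, v.2.1, v.2.2 ++ [pq.1])
  else v

def gerar_grupo_vencedores (partipantes : List (String × Int)) : List (String × List String) :=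
  let venc := partipantes.foldl gerarStep ([], [], [])
  [("12 Acertos", venc.1), ("11 Acertos", venc.2.1), ("10 Acertos", venc.2.2)]

-- ===== PORT B =====
-- Port of B: three independent filtered comprehensions.
def gerar_grupo_vencedores_alt (partipantes : List (String × Int)) : List (String × List String) :=
  [("12 Acertos", (partipantes.filter (fun pq => pq.2 == 12)).map Prod.fst),
   ("11 Acertos", (partipantes.filter (fun pq => pq.2 == 11)).map Prod.fst),
   ("10 Acertos", (partipantes.filter (fun pq => pq.2 == 10)).map Prod.fst)]

-- ===== PRECONDITION & SPEC =====
def Spec_gerar_grupo_vencedores (partipantes : List (String × Int)) (out : List (String × List String)) : Prop := out = gerar_grupo_vencedores_alt partipantes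
instance (partipantes : List (String × Int)) (out : List (String × List String)) : Decidable (Spec_gerar_grupo_vencedores partipantes out) := by unfold Spec_gerar_grupo_vencedores; infer_instance

-- ===== CLAIM (what is proved, stated in full; the proofs are below) =====
def Claim_equal_gerar_grupo_vencedores : Prop := ∀ (partipantes : List (String × Int)), Dom_gerar_grupo_vencedores partipantes → Spec_gerar_grupo_vencedores partipantes (gerar_grupo_vencedores partipantes)

-- ===== LEMMAS AND PROOFS =====

-- ===== VERDICT (by name: the statement is the Claim_ definition above) =====
lemma gerar_foldl (partipantes : List (String × Int)) (a b c : List String) :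
    partipantes.foldl gerarStep (a, b, c)
    = (a ++ (partipantes.filter (fun pq => pq.2 == 12)).map Prod.fst,
       b ++ (partipantes.filter (fun pq => pq.2 == 11)).map Prod.fst,
       c ++ (partipantes.filter (fun pq => pq.2 == 10)).map Prod.fst) := by
  induction partipantes generalizing a b c with
  | nil => simp
  | cons hd tl ih =>
    simp only [List.foldl_cons, List.filter_cons, gerarStep]
    by_cases h12 : hd.2 = 12 <;> by_cases h11 : hd.2 = 11 <;> by_cases h10 : hd.2 = 10 <;>
      simp [h12, h11, h10, ih]

theorem gerar_grupo_vencedores_spec : Claim_equal_gerar_grupo_vencedores := by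
  intro partipantes _
  unfold Spec_gerar_grupo_vencedores gerar_grupo_vencedores gerar_grupo_vencedores_alt
  rw [show (([],[],[]) : List String × List String × List String) = ([],[],[]) from rfl, gerar_foldl]
  simp
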